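-- pv_equiv track=rewrite | github.com/queenJiJi/Algorithm_Study | Problems/컵이동.py | solution
-- ===== SOURCE A (Python) =====
-- from collections import deque
--
-- def solution(board, requests):
--     rows, cols = len(board), len(board[0])
--     board = [list(row) for row in board]  # 문자열을 2D 배열로 변환
--     to_remove = [[False for _ in range(cols)] for _ in range(rows)]  # 제거할 칸 표시
--
--     # 상하좌우 탐색을 위한 방향 벡터
--     directions = [(-1, 0), (1, 0), (0, -1), (0, 1)]
--
--     def is_on_edge(r, c):
--         """해당 좌표가 보드의 가장자리에 있는지 확인"""
--         return r == 0 or r == rows - 1 or c == 0 or c == cols - 1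
--
--     def bfs(r, c, char):
--         """BFS로 외부와 연결된 해당 문자를 제거"""
--         queue = deque([(r, c)])
--         cluster = [(r, c)]
--         to_remove[r][c] = True
--         is_edge = is_on_edge(r, c)
--
--         while queue:
--             x, y = queue.popleft()
--             for dx, dy in directions:
--                 nx, ny = x + dx, y + dy
--                 if 0 <= nx < rows and 0 <= ny < cols and not to_remove[nx][ny] and board[nx][ny] == char:
--                     queue.append((nx, ny))
--                     cluster.append((nx, ny))
--                     to_remove[nx][ny] = True
--                     if is_on_edge(nx, ny):
--                         is_edge = True
--
--         # 외부에 맞닿아 있지 않고 연속된 문자인 경우 모두 제거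
--         if not is_edge and char in requests:
--             for x, y in cluster:
--                 to_remove[x][y] = True
--
--     # 1. 외부에 있는 문자부터 BFS로 탐색하여 제거
--     for r in range(rows):
--         for c in range(cols):
--             if board[r][c] in requests and not to_remove[r][c]:
--                 bfs(r, c, board[r][c])
--
--     # 2. 남은 칸 계산
--     remaining_cells = 0
--     for r in range(rows):
--         for c in range(cols):
--             if not to_remove[r][c]:
--                 remaining_cells += 1
--
--     return remaining_cells
-- ===== SOURCE B (Python) =====
-- # B: the BFS in A marks every visited cell unconditionally, so the removed cells are exactly
-- # those whose character occurs in requests; count the rest in one pass (simpler, no flood fill).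
-- def solution(board, requests):
--     cols = len(board[0])
--     req = set(requests)
--     total = 0
--     for row in board:
--         for ch in row[:cols]:
--             if ch not in req:
--                 total += 1
--     return total
-- ===== Notes on version B (the rewrite author's own statement) =====
-- stated objective: simpler
-- what changed: Replaced the whole BFS flood-fill machinery (queue, to_remove grid, edge detection, cluster re-marking) by a single counting pass: A's BFS marks every visited cell unconditionally and its is_edge/cluster logic is dead code, so the result is just the number of cells whose character is not in requests.
import Mathlib
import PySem

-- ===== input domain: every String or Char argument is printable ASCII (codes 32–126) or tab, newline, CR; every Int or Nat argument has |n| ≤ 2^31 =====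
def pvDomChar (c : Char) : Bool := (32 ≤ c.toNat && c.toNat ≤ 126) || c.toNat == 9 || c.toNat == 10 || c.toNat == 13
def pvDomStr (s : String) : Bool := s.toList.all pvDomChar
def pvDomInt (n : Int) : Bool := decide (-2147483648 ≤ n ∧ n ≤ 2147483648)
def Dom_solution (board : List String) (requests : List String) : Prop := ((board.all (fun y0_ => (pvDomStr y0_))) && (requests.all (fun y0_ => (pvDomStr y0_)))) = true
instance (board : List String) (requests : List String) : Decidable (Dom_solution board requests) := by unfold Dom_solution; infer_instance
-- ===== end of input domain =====

-- B removes the whole BFS flood fill of A: A's BFS marks every visited cell unconditionally, so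
-- the removed cells are exactly those whose character is in requests; B counts the others directly.
-- The proved equivalence is about the RETURN value (A rebinds only its local copy of board).

-- ===== PORT A =====
-- to_remove[x][y] / board[x][y]; exact for the indices A uses (guards ensure 0 ≤ x, y in range)
def pvBget (g : List (List Bool)) (x y : Int) : Bool :=
  (g.getD x.toNat []).getD y.toNat false

def pvCget (b : List (List Char)) (x y : Int) : Char :=
  (b.getD x.toNat []).getD y.toNat ' '

-- to_remove[x][y] = True
def pvBset (g : List (List Bool)) (x y : Int) : List (List Bool) :=
  g.set x.toNat ((g.getD x.toNat []).set y.toNat true)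

-- the grid keeps shape rows × cols throughout; carried as a (proof-irrelevant) hypothesis so the
-- BFS while-loop's termination measure (queue length + 2·unmarked cells) is provable
def pvShape (g : List (List Bool)) (rows cols : Nat) : Prop :=
  g.length = rows ∧ ∀ row ∈ g, row.length = cols

def pvFalses (g : List (List Bool)) : Nat :=
  (g.map (fun row => row.count false)).sum

def pvOnEdge (rows cols : Nat) (r c : Int) : Bool :=
  r == 0 || r == (rows : Int) - 1 || c == 0 || c == (cols : Int) - 1

-- one direction (dx,dy) of the inner `for dx, dy in directions` loop; state = (queue, cluster, to_remove, is_edge)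
def pvDirStep (board2 : List (List Char)) (ch : Char) (rows cols : Nat) (x y : Int)
    (st : List (Int × Int) × List (Int × Int) × List (List Bool) × Bool) (d : Int × Int) :
    List (Int × Int) × List (Int × Int) × List (List Bool) × Bool :=
  let nx := x + d.1
  let ny := y + d.2
  if 0 ≤ nx ∧ nx < (rows : Int) ∧ 0 ≤ ny ∧ ny < (cols : Int) ∧
      pvBget st.2.2.1 nx ny = false ∧ pvCget board2 nx ny = ch then
    (st.1 ++ [(nx, ny)], st.2.1 ++ [(nx, ny)], pvBset st.2.2.1 nx ny,
      st.2.2.2 || pvOnEdge rows cols nx ny)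
  else st

-- termination helpers for the while-loop (cited in decreasing_by and by the port's shape arguments)
theorem pvBset_shape (g : List (List Bool)) (x y : Int) (rows cols : Nat)
    (hs : pvShape g rows cols) : pvShape (pvBset g x y) rows cols := by
  obtain ⟨hl, hr⟩ := hs
  by_cases hx : x.toNat < g.length
  · refine ⟨by simpa [pvBset] using hl, ?_⟩
    intro row hrow
    rcases List.mem_or_eq_of_mem_set hrow with h | h
    · exact hr row h
    · subst h
      rw [List.getD_eq_getElem g [] hx, List.length_set]
      exact hr _ (List.getElem_mem hx)
  · have : pvBset g x y = g := List.set_eq_of_length_le (le_of_not_gt hx)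
    rw [this]
    exact ⟨hl, hr⟩

theorem pvSum_set : ∀ (l : List Nat) (i a : Nat) (h : i < l.length),
    (l.set i a).sum + l[i]'h = l.sum + a := by
  intro l
  induction l with
  | nil => simp
  | cons hd tl ih =>
    intro i a hi
    cases i with
    | zero => simp [List.set]; omega
    | succ n =>
      have := ih n a (by simpa using hi)
      simp [List.set]
      omega

theorem pvCount_set : ∀ (l : List Bool) (j : Nat) (hj : j < l.length), l[j]'hj = false →
    (l.set j true).count false + 1 = l.count false := by
  intro l
  induction l with
  | nil => simp
  | cons hd tl ih =>
    intro j hj hval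
    cases j with
    | zero => simp_all [List.set]
    | succ n =>
      have := ih n (by simpa using hj) (by simpa using hval)
      simp_all [List.set, List.count_cons]
      omega

theorem pvBset_falses (g : List (List Bool)) (x y : Int) (rows cols : Nat)
    (hs : pvShape g rows cols) (hx0 : 0 ≤ x) (hx : x < (rows : Int))
    (hy0 : 0 ≤ y) (hy : y < (cols : Int)) (hf : pvBget g x y = false) :
    pvFalses (pvBset g x y) + 1 = pvFalses g := by
  obtain ⟨hl, hr⟩ := hs
  have hxl : x.toNat < g.length := by omega
  have hrow : g.getD x.toNat [] = g[x.toNat]'hxl := List.getD_eq_getElem g [] hxl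
  have hlen : (g[x.toNat]'hxl).length = cols := hr _ (List.getElem_mem hxl)
  have hyl : y.toNat < (g[x.toNat]'hxl).length := by omega
  have hval : (g[x.toNat]'hxl)[y.toNat]'hyl = false := by
    have := hf
    unfold pvBget at this
    rwa [hrow, List.getD_eq_getElem _ false hyl] at this
  have hc := pvCount_set (g[x.toNat]'hxl) y.toNat hyl hval
  unfold pvBset pvFalses
  rw [hrow, List.map_set]
  have hxm : x.toNat < (g.map (fun row => row.count false)).length := by simpa using hxl
  have hs2 := pvSum_set (g.map (fun row => row.count false)) x.toNat
    (((g[x.toNat]'hxl).set y.toNat true).count false) hxm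
  have hgm : (g.map (fun row => row.count false))[x.toNat]'hxm = (g[x.toNat]'hxl).count false := by
    simp
  rw [hgm] at hs2
  omega

theorem pvFoldDirs_inv (board2 : List (List Char)) (ch : Char) (rows cols : Nat) (x y : Int)
    (ds : List (Int × Int)) (st : List (Int × Int) × List (Int × Int) × List (List Bool) × Bool)
    (hs : pvShape st.2.2.1 rows cols) :
    pvShape (ds.foldl (pvDirStep board2 ch rows cols x y) st).2.2.1 rows cols ∧
    (ds.foldl (pvDirStep board2 ch rows cols x y) st).1.length +
      2 * pvFalses (ds.foldl (pvDirStep board2 ch rows cols x y) st).2.2.1 ≤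
      st.1.length + 2 * pvFalses st.2.2.1 := by
  induction ds generalizing st with
  | nil => exact ⟨hs, le_refl _⟩
  | cons d ds ih =>
    have hstep : pvShape (pvDirStep board2 ch rows cols x y st d).2.2.1 rows cols ∧
        (pvDirStep board2 ch rows cols x y st d).1.length +
          2 * pvFalses (pvDirStep board2 ch rows cols x y st d).2.2.1 ≤
          st.1.length + 2 * pvFalses st.2.2.1 := by
      dsimp only [pvDirStep]
      split
      · rename_i hg
        obtain ⟨h1, h2, h3, h4, h5, h6⟩ := hg
        refine ⟨pvBset_shape _ _ _ rows cols hs, ?_⟩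
        have := pvBset_falses st.2.2.1 (x + d.1) (y + d.2) rows cols hs h1 h2 h3 h4 h5
        simp only [List.length_append, List.length_cons, List.length_nil]
        omega
      · exact ⟨hs, le_refl _⟩
    have hrest := ih (pvDirStep board2 ch rows cols x y st d) hstep.1
    simp only [List.foldl_cons]
    exact ⟨hrest.1, by have h1 := hrest.2; have h2 := hstep.2; omega⟩

-- the `while queue:` loop of bfs
def pvBfsLoop (board2 : List (List Char)) (ch : Char) (rows cols : Nat)
    (q cl : List (Int × Int)) (g : List (List Bool)) (e : Bool) (hs : pvShape g rows cols) :
    {p : List (List Bool) × List (Int × Int) × Bool // pvShape p.1 rows cols} :=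
  match q with
  | [] => ⟨(g, cl, e), hs⟩
  | (x, y) :: t =>
    let st := [((-1 : Int), (0 : Int)), (1, 0), (0, -1), (0, 1)].foldl
      (pvDirStep board2 ch rows cols x y) (t, cl, g, e)
    pvBfsLoop board2 ch rows cols st.1 st.2.1 st.2.2.1 st.2.2.2
      (pvFoldDirs_inv board2 ch rows cols x y _ (t, cl, g, e) hs).1
termination_by q.length + 2 * pvFalses g
decreasing_by
  have h := (pvFoldDirs_inv board2 ch rows cols x y
    [((-1 : Int), (0 : Int)), (1, 0), (0, -1), (0, 1)] (t, cl, g, e) hs).2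
  dsimp only at h
  simp only [List.length_cons]
  omega

theorem pvFoldSet_shape (cl : List (Int × Int)) (g : List (List Bool)) (rows cols : Nat)
    (hs : pvShape g rows cols) :
    pvShape (cl.foldl (fun gg p => pvBset gg p.1 p.2) g) rows cols := by
  induction cl generalizing g with
  | nil => exact hs
  | cons p ps ih => exact ih _ (pvBset_shape g p.1 p.2 rows cols hs)

-- def bfs(r, c, char)
def pvBfs (board2 : List (List Char)) (requests : List String) (rows cols : Nat)
    (r c : Int) (ch : Char) (g : List (List Bool)) (hs : pvShape g rows cols) :
    {g' : List (List Bool) // pvShape g' rows cols} :=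
  let g1 := pvBset g r c
  let res := pvBfsLoop board2 ch rows cols [(r, c)] [(r, c)] g1 (pvOnEdge rows cols r c)
    (pvBset_shape g r c rows cols hs)
  if !res.1.2.2 && requests.contains (String.singleton ch) then
    ⟨res.1.2.1.foldl (fun gg p => pvBset gg p.1 p.2) res.1.1,
      pvFoldSet_shape _ _ rows cols res.2⟩
  else ⟨res.1.1, res.2⟩

-- `for c in range(cols):` of phase 1
def pvLoopC (board2 : List (List Char)) (requests : List String) (rows cols : Nat) (r : Nat) :
    List Nat → {g : List (List Bool) // pvShape g rows cols} → {g : List (List Bool) // pvShape g rows cols}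
  | [], gs => gs
  | c :: cs, gs =>
    pvLoopC board2 requests rows cols r cs
      (if requests.contains (String.singleton (pvCget board2 (r : Int) (c : Int))) &&
          !pvBget gs.1 (r : Int) (c : Int) then
        pvBfs board2 requests rows cols (r : Int) (c : Int)
          (pvCget board2 (r : Int) (c : Int)) gs.1 gs.2
      else gs)

-- `for r in range(rows):` of phase 1
def pvLoopR (board2 : List (List Char)) (requests : List String) (rows cols : Nat) :
    List Nat → {g : List (List Bool) // pvShape g rows cols} → {g : List (List Bool) // pvShape g rows cols}
  | [], gs => gs
  | r :: rs, gs =>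
    pvLoopR board2 requests rows cols rs (pvLoopC board2 requests rows cols r (List.range cols) gs)

theorem pvShape_replicate (rows cols : Nat) :
    pvShape (List.replicate rows (List.replicate cols false)) rows cols := by
  constructor
  · simp
  · intro row hrow
    rw [List.eq_of_mem_replicate hrow]
    simp

def solution (board : List String) (requests : List String) : Int :=
  let rows := board.length
  -- cols = len(board[0]); Python raises IndexError on an empty board — excluded by Pre_solution
  let cols := (board.headD "").toList.length
  let board2 := board.map String.toList
  let g0 : List (List Bool) := List.replicate rows (List.replicate cols false)
  let gF := (pvLoopR board2 requests rows cols (List.range rows)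
    ⟨g0, pvShape_replicate rows cols⟩).1
  -- phase 2: remaining_cells
  (List.range rows).foldl (fun acc (r : Nat) =>
    (List.range cols).foldl (fun acc (c : Nat) =>
      if pvBget gF (r : Int) (c : Int) = false then acc + 1 else acc) acc) (0 : Int)

-- ===== PORT B =====
def solution_alt (board : List String) (requests : List String) : Int :=
  let cols := (board.headD "").toList.length  -- len(board[0]); IndexError on [] — outside Pre_solution
  let req : PySem.Set String := PySem.Set.ofList requests
  board.foldl (fun total row =>
    (row.toList.take cols).foldl (fun t ch =>  -- row[:cols]
      if !PySem.Set.contains req (String.singleton ch) then t + 1 else t) total) 0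

-- ===== PRECONDITION & SPEC =====
-- Pre_ excludes exactly the inputs where A raises IndexError: the empty board (board[0]) and
-- boards where some row is shorter than the first row (board[r][c] for c in range(cols)).
def Pre_solution (board : List String) (requests : List String) : Prop :=
  board ≠ [] ∧ ∀ s ∈ board, (board.headD "").toList.length ≤ s.toList.length
instance (board : List String) (requests : List String) : Decidable (Pre_solution board requests) := by
  unfold Pre_solution; infer_instance

def pvWitness_solution : List String × List String := (["ab", "cb"], ["a"])

def Spec_solution (board : List String) (requests : List String) (out : Int) : Prop :=
  out = solution_alt board requests
instance (board : List String) (requests : List String) (out : Int) : Decidable (Spec_solution board requests out) := by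
  unfold Spec_solution; infer_instance

-- ===== CLAIM (what is proved, stated in full; the proofs are below) =====
def Claim_equal_solution : Prop := ∀ (board : List String) (requests : List String), Dom_solution board requests → Pre_solution board requests → Spec_solution board requests (solution board requests)

-- ===== LEMMAS AND PROOFS =====

-- row-level facts about getD/set (local to this file's grids)
theorem pvRowMono (row : List Bool) (j m : Nat) (h : row.getD m false = true) :
    (row.set j true).getD m false = true := by
  induction row generalizing j m with
  | nil => simp_all
  | cons b t ih =>
    cases j with
    | zero =>
      cases m with
      | zero => simp
      | succ m => simpa using h
    | succ j =>
      cases m with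
      | zero => simpa using h
      | succ m => simpa using ih j m (by simpa using h)

theorem pvRowCases (row : List Bool) (j m : Nat)
    (h : (row.set j true).getD m false = true) : row.getD m false = true ∨ m = j := by
  induction row generalizing j m with
  | nil => simp_all
  | cons b t ih =>
    cases j with
    | zero =>
      cases m with
      | zero => right; rfl
      | succ m => left; simpa using h
    | succ j =>
      cases m with
      | zero => left; simpa using h
      | succ m =>
        rcases ih j m (by simpa using h) with h' | h'
        · left; simpa using h'
        · right; omega

theorem pvRowSelf (row : List Bool) (j : Nat) (hj : j < row.length) :
    (row.set j true).getD j false = true := by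
  induction row generalizing j with
  | nil => simp at hj
  | cons b t ih =>
    cases j with
    | zero => simp
    | succ j => simpa using ih j (by simpa using hj)

-- grid-level facts, Nat indices
theorem pvGridMono' (g : List (List Bool)) (i j n m : Nat)
    (h : (g.getD n []).getD m false = true) :
    ((g.set i ((g.getD i []).set j true)).getD n []).getD m false = true := by
  induction g generalizing i n with
  | nil => simp_all
  | cons r t ih =>
    cases i with
    | zero =>
      cases n with
      | zero => simpa using pvRowMono r j m (by simpa using h)
      | succ n => simpa using h
    | succ i =>
      cases n with
      | zero => simpa using h
      | succ n => simpa using ih i n (by simpa using h)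

theorem pvGridCases' (g : List (List Bool)) (i j n m : Nat)
    (h : ((g.set i ((g.getD i []).set j true)).getD n []).getD m false = true) :
    (g.getD n []).getD m false = true ∨ (n = i ∧ m = j) := by
  induction g generalizing i n with
  | nil => simp_all
  | cons r t ih =>
    cases i with
    | zero =>
      cases n with
      | zero =>
        rcases pvRowCases r j m (by simpa using h) with h' | h'
        · left; simpa using h'
        · right; exact ⟨rfl, h'⟩
      | succ n => left; simpa using h
    | succ i =>
      cases n with
      | zero => left; simpa using h
      | succ n =>
        rcases ih i n (by simpa using h) with h' | h'
        · left; simpa using h'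
        · right; omega
  
theorem pvGridSelf' (g : List (List Bool)) (i j : Nat) (hi : i < g.length)
    (hj : j < (g.getD i []).length) :
    ((g.set i ((g.getD i []).set j true)).getD i []).getD j false = true := by
  induction g generalizing i with
  | nil => simp at hi
  | cons r t ih =>
    cases i with
    | zero => simpa using pvRowSelf r j (by simpa using hj)
    | succ i => simpa using ih i (by simpa using hi) (by simpa using hj)

-- Int wrappers
theorem pvBget_bset_mono (g : List (List Bool)) (x y u v : Int)
    (h : pvBget g u v = true) : pvBget (pvBset g x y) u v = true :=
  pvGridMono' g x.toNat y.toNat u.toNat v.toNat h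

theorem pvBget_bset_cases (g : List (List Bool)) (x y u v : Int)
    (h : pvBget (pvBset g x y) u v = true) :
    pvBget g u v = true ∨ (u.toNat = x.toNat ∧ v.toNat = y.toNat) :=
  pvGridCases' g x.toNat y.toNat u.toNat v.toNat h

theorem pvBget_bset_self (g : List (List Bool)) (x y : Int) (rows cols : Nat)
    (hs : pvShape g rows cols) (hx0 : 0 ≤ x) (hx : x < (rows : Int))
    (hy0 : 0 ≤ y) (hy : y < (cols : Int)) : pvBget (pvBset g x y) x y = true := by
  obtain ⟨hl, hr⟩ := hs
  have hi : x.toNat < g.length := by omega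
  have hj : y.toNat < (g.getD x.toNat []).length := by
    rw [List.getD_eq_getElem g [] hi]
    have := hr _ (List.getElem_mem hi)
    omega
  exact pvGridSelf' g x.toNat y.toNat hi hj

theorem pvCget_congr (b : List (List Char)) (u v u' v' : Int)
    (h1 : u.toNat = u'.toNat) (h2 : v.toNat = v'.toNat) : pvCget b u v = pvCget b u' v' := by
  unfold pvCget
  rw [h1, h2]

-- the four-direction fold: marks only grow, new marks carry the character ch,
-- the cluster gains only cells carrying ch
theorem pvFoldDirs_props (board2 : List (List Char)) (ch : Char) (rows cols : Nat) (x y : Int)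
    (ds : List (Int × Int)) (st : List (Int × Int) × List (Int × Int) × List (List Bool) × Bool) :
    (∀ u v : Int, pvBget st.2.2.1 u v = true →
        pvBget (ds.foldl (pvDirStep board2 ch rows cols x y) st).2.2.1 u v = true) ∧
    (∀ u v : Int, pvBget (ds.foldl (pvDirStep board2 ch rows cols x y) st).2.2.1 u v = true →
        pvBget st.2.2.1 u v = true ∨ pvCget board2 u v = ch) ∧
    (∀ p ∈ (ds.foldl (pvDirStep board2 ch rows cols x y) st).2.1,
        p ∈ st.2.1 ∨ pvCget board2 p.1 p.2 = ch) := by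
  induction ds generalizing st with
  | nil => exact ⟨fun u v h => h, fun u v h => Or.inl h, fun p hp => Or.inl hp⟩
  | cons d ds ih =>
    have hstep :
        (∀ u v : Int, pvBget st.2.2.1 u v = true →
            pvBget (pvDirStep board2 ch rows cols x y st d).2.2.1 u v = true) ∧
        (∀ u v : Int, pvBget (pvDirStep board2 ch rows cols x y st d).2.2.1 u v = true →
            pvBget st.2.2.1 u v = true ∨ pvCget board2 u v = ch) ∧
        (∀ p ∈ (pvDirStep board2 ch rows cols x y st d).2.1,
            p ∈ st.2.1 ∨ pvCget board2 p.1 p.2 = ch) := by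
      dsimp only [pvDirStep]
      split
      · rename_i hg
        obtain ⟨h1, h2, h3, h4, h5, h6⟩ := hg
        refine ⟨fun u v h => pvBget_bset_mono _ _ _ _ _ h, fun u v h => ?_, fun p hp => ?_⟩
        · rcases pvBget_bset_cases _ _ _ _ _ h with h' | ⟨e1, e2⟩
          · exact Or.inl h'
          · right; rw [pvCget_congr board2 u v (x + d.1) (y + d.2) e1 e2]; exact h6
        · rcases List.mem_append.1 hp with h' | h'
          · exact Or.inl h'
          · right
            have : p = (x + d.1, y + d.2) := by simpa using h'
            subst this
            exact h6
      · exact ⟨fun u v h => h, fun u v h => Or.inl h, fun p hp => Or.inl hp⟩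
    have hrest := ih (pvDirStep board2 ch rows cols x y st d)
    simp only [List.foldl_cons]
    refine ⟨fun u v h => hrest.1 u v (hstep.1 u v h), fun u v h => ?_, fun p hp => ?_⟩
    · rcases hrest.2.1 u v h with h' | h'
      · exact hstep.2.1 u v h'
      · exact Or.inr h'
    · rcases hrest.2.2 p hp with h' | h'
      · exact hstep.2.2 p h'
      · exact Or.inr h'

-- the while-loop preserves the same three properties
theorem pvBfsLoop_inv (board2 : List (List Char)) (ch : Char) (rows cols : Nat)
    (q cl : List (Int × Int)) (g : List (List Bool)) (e : Bool) (hs : pvShape g rows cols) :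
    (∀ u v : Int, pvBget g u v = true →
        pvBget (pvBfsLoop board2 ch rows cols q cl g e hs).1.1 u v = true) ∧
    (∀ u v : Int, pvBget (pvBfsLoop board2 ch rows cols q cl g e hs).1.1 u v = true →
        pvBget g u v = true ∨ pvCget board2 u v = ch) ∧
    (∀ p ∈ (pvBfsLoop board2 ch rows cols q cl g e hs).1.2.1,
        p ∈ cl ∨ pvCget board2 p.1 p.2 = ch) := by
  induction q, cl, g, e, hs using pvBfsLoop.induct board2 ch rows cols with
  | case1 cl g e hs =>
    rw [pvBfsLoop]
    exact ⟨fun u v h => h, fun u v h => Or.inl h, fun p hp => Or.inl hp⟩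
  | case2 cl g e hs x y t st ih =>
    rw [pvBfsLoop]
    have hf := pvFoldDirs_props board2 ch rows cols x y
      [((-1 : Int), (0 : Int)), (1, 0), (0, -1), (0, 1)] (t, cl, g, e)
    refine ⟨fun u v h => ih.1 u v (hf.1 u v h), fun u v h => ?_, fun p hp => ?_⟩
    · rcases ih.2.1 u v h with h' | h'
      · exact hf.2.1 u v h'
      · exact Or.inr h'
    · rcases ih.2.2 p hp with h' | h'
      · exact hf.2.2 p h'
      · exact Or.inr h'

-- the cluster re-marking fold: marks grow; new marks sit at cluster positions
theorem pvFoldSet_props (cl : List (Int × Int)) (g : List (List Bool)) :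
    (∀ u v : Int, pvBget g u v = true →
        pvBget (cl.foldl (fun gg p => pvBset gg p.1 p.2) g) u v = true) ∧
    (∀ u v : Int, pvBget (cl.foldl (fun gg p => pvBset gg p.1 p.2) g) u v = true →
        pvBget g u v = true ∨ ∃ p ∈ cl, u.toNat = p.1.toNat ∧ v.toNat = p.2.toNat) := by
  induction cl generalizing g with
  | nil => exact ⟨fun u v h => h, fun u v h => Or.inl h⟩
  | cons p ps ih =>
    simp only [List.foldl_cons]
    refine ⟨fun u v h => (ih (pvBset g p.1 p.2)).1 u v (pvBget_bset_mono _ _ _ _ _ h),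
      fun u v h => ?_⟩
    rcases (ih (pvBset g p.1 p.2)).2 u v h with h' | ⟨q, hq, e1, e2⟩
    · rcases pvBget_bset_cases _ _ _ _ _ h' with h'' | ⟨e1, e2⟩
      · exact Or.inl h''
      · exact Or.inr ⟨p, List.mem_cons_self .., ⟨e1, e2⟩⟩
    · exact Or.inr ⟨q, List.mem_cons_of_mem p hq, ⟨e1, e2⟩⟩

-- bfs(r, c, char): marks grow, and every new mark carries the character ch
theorem pvBfs_mono_safe (board2 : List (List Char)) (requests : List String) (rows cols : Nat)
    (r c : Int) (ch : Char) (g : List (List Bool)) (hs : pvShape g rows cols)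
    (hchar : pvCget board2 r c = ch) :
    (∀ u v : Int, pvBget g u v = true →
        pvBget (pvBfs board2 requests rows cols r c ch g hs).1 u v = true) ∧
    (∀ u v : Int, pvBget (pvBfs board2 requests rows cols r c ch g hs).1 u v = true →
        pvBget g u v = true ∨ pvCget board2 u v = ch) := by
  dsimp only [pvBfs]
  have hloop := pvBfsLoop_inv board2 ch rows cols [(r, c)] [(r, c)] (pvBset g r c)
    (pvOnEdge rows cols r c) (pvBset_shape g r c rows cols hs)
  have hbase : ∀ u v : Int, pvBget (pvBset g r c) u v = true →
      pvBget g u v = true ∨ pvCget board2 u v = ch := by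
    intro u v h
    rcases pvBget_bset_cases _ _ _ _ _ h with h' | ⟨e1, e2⟩
    · exact Or.inl h'
    · right; rw [pvCget_congr board2 u v r c e1 e2]; exact hchar
  split
  · set res := pvBfsLoop board2 ch rows cols [(r, c)] [(r, c)] (pvBset g r c)
      (pvOnEdge rows cols r c) (pvBset_shape g r c rows cols hs) with hres
    have hfold := pvFoldSet_props res.1.2.1 res.1.1
    refine ⟨fun u v h => hfold.1 u v (hloop.1 u v (pvBget_bset_mono _ _ _ _ _ h)),
      fun u v h => ?_⟩
    rcases hfold.2 u v h with h' | ⟨p, hp, e1, e2⟩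
    · rcases hloop.2.1 u v h' with h'' | h''
      · exact hbase u v h''
      · exact Or.inr h''
    · rcases hloop.2.2 p hp with h' | h'
      · have : p = (r, c) := by simpa using h'
        subst this
        right; rw [pvCget_congr board2 u v r c e1 e2]; exact hchar
      · right; rw [pvCget_congr board2 u v p.1 p.2 e1 e2]; exact h'
  · exact ⟨fun u v h => hloop.1 u v (pvBget_bset_mono _ _ _ _ _ h),
      fun u v h => by
        rcases hloop.2.1 u v h with h' | h'
        · exact hbase u v h'
        · exact Or.inr h'⟩

theorem pvBfs_self (board2 : List (List Char)) (requests : List String) (rows cols : Nat)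
    (r c : Int) (ch : Char) (g : List (List Bool)) (hs : pvShape g rows cols)
    (hr0 : 0 ≤ r) (hrr : r < (rows : Int)) (hc0 : 0 ≤ c) (hcc : c < (cols : Int)) :
    pvBget (pvBfs board2 requests rows cols r c ch g hs).1 r c = true := by
  dsimp only [pvBfs]
  have hself : pvBget (pvBset g r c) r c = true :=
    pvBget_bset_self g r c rows cols hs hr0 hrr hc0 hcc
  have hloop := pvBfsLoop_inv board2 ch rows cols [(r, c)] [(r, c)] (pvBset g r c)
    (pvOnEdge rows cols r c) (pvBset_shape g r c rows cols hs)
  split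
  · exact (pvFoldSet_props _ _).1 r c (hloop.1 r c hself)
  · exact hloop.1 r c hself

-- phase-1 inner loop over the column indices
theorem pvLoopC_inv (board2 : List (List Char)) (requests : List String) (rows cols r : Nat)
    (cs : List Nat)
    (gs : {g : List (List Bool) // pvShape g rows cols}) :
    (∀ u v : Int, pvBget gs.1 u v = true →
        pvBget (pvLoopC board2 requests rows cols r cs gs).1 u v = true) ∧
    (∀ u v : Int, pvBget (pvLoopC board2 requests rows cols r cs gs).1 u v = true →
        pvBget gs.1 u v = true ∨
          requests.contains (String.singleton (pvCget board2 u v)) = true) ∧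
    (∀ c ∈ cs, r < rows → c < cols →
        requests.contains (String.singleton (pvCget board2 (r : Int) (c : Int))) = true →
        pvBget (pvLoopC board2 requests rows cols r cs gs).1 (r : Int) (c : Int) = true) := by
  induction cs generalizing gs with
  | nil =>
    rw [pvLoopC]
    exact ⟨fun u v h => h, fun u v h => Or.inl h, fun c hc => absurd hc (List.not_mem_nil)⟩
  | cons c cs ih =>
    rw [pvLoopC]
    set gs1 := (if requests.contains (String.singleton (pvCget board2 (r : Int) (c : Int))) &&
          !pvBget gs.1 (r : Int) (c : Int) then
        pvBfs board2 requests rows cols (r : Int) (c : Int)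
          (pvCget board2 (r : Int) (c : Int)) gs.1 gs.2
      else gs) with hgs1
    have hstep :
        (∀ u v : Int, pvBget gs.1 u v = true → pvBget gs1.1 u v = true) ∧
        (∀ u v : Int, pvBget gs1.1 u v = true →
            pvBget gs.1 u v = true ∨
              requests.contains (String.singleton (pvCget board2 u v)) = true) := by
      rw [hgs1]
      split
      · rename_i hg
        have hb := pvBfs_mono_safe board2 requests rows cols (r : Int) (c : Int)
          (pvCget board2 (r : Int) (c : Int)) gs.1 gs.2 rfl
        refine ⟨hb.1, fun u v h => ?_⟩
        rcases hb.2 u v h with h' | h'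
        · exact Or.inl h'
        · right
          rw [h']
          simp only [Bool.and_eq_true] at hg
          exact hg.1
      · exact ⟨fun u v h => h, fun u v h => Or.inl h⟩
    have hrest := ih gs1
    refine ⟨fun u v h => hrest.1 u v (hstep.1 u v h), fun u v h => ?_, ?_⟩
    · rcases hrest.2.1 u v h with h' | h'
      · exact hstep.2 u v h'
      · exact Or.inr h'
    · intro c' hc' hrr hlt hreq
      rcases List.mem_cons.1 hc' with rfl | hmem
      · -- the head column: after the step the cell is marked, then marks only grow
        have hmarked : pvBget gs1.1 (r : Int) (c' : Int) = true := by
          rw [hgs1]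
          split
          · exact pvBfs_self board2 requests rows cols (r : Int) (c' : Int)
              (pvCget board2 (r : Int) (c' : Int)) gs.1 gs.2
              (by omega) (by exact_mod_cast Nat.cast_lt.2 hrr) (by omega)
              (by exact_mod_cast Nat.cast_lt.2 hlt)
          · rename_i hg
            simp only [hreq, Bool.true_and, Bool.not_eq_true', Bool.not_eq_false] at hg
            exact hg
        exact hrest.1 (r : Int) (c' : Int) hmarked
      · exact hrest.2.2 c' hmem hrr hlt hreq

-- phase-1 outer loop over the row indices
theorem pvLoopR_inv (board2 : List (List Char)) (requests : List String) (rows cols : Nat)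
    (rs : List Nat) (gs : {g : List (List Bool) // pvShape g rows cols}) :
    (∀ u v : Int, pvBget gs.1 u v = true →
        pvBget (pvLoopR board2 requests rows cols rs gs).1 u v = true) ∧
    (∀ u v : Int, pvBget (pvLoopR board2 requests rows cols rs gs).1 u v = true →
        pvBget gs.1 u v = true ∨
          requests.contains (String.singleton (pvCget board2 u v)) = true) ∧
    (∀ r ∈ rs, r < rows → ∀ c : Nat, c < cols →
        requests.contains (String.singleton (pvCget board2 (r : Int) (c : Int))) = true →
        pvBget (pvLoopR board2 requests rows cols rs gs).1 (r : Int) (c : Int) = true) := by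
  induction rs generalizing gs with
  | nil =>
    rw [pvLoopR]
    exact ⟨fun u v h => h, fun u v h => Or.inl h, fun r hr => absurd hr (List.not_mem_nil)⟩
  | cons r rs ih =>
    rw [pvLoopR]
    have hrest := ih (pvLoopC board2 requests rows cols r (List.range cols) gs)
    have hC := pvLoopC_inv board2 requests rows cols r (List.range cols) gs
    refine ⟨fun u v h => hrest.1 u v (hC.1 u v h), fun u v h => ?_, ?_⟩
    · rcases hrest.2.1 u v h with h' | h'
      · exact hC.2.1 u v h'
      · exact Or.inr h'
    · intro r' hr' hltr c hltc hreq
      rcases List.mem_cons.1 hr' with rfl | hmem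
      · exact hrest.1 _ _ (hC.2.2 c (List.mem_range.2 hltc) hltr hltc hreq)
      · exact hrest.2.2 r' hmem hltr c hltc hreq

-- the initial grid is all-false
theorem pvBget_replicate (rows cols : Nat) (u v : Int) :
    pvBget (List.replicate rows (List.replicate cols false)) u v = false := by
  unfold pvBget
  rcases Nat.lt_or_ge u.toNat rows with h | h
  · rw [List.getD_eq_getElem (List.replicate rows (List.replicate cols false)) []
      (by simpa using h), List.getElem_replicate]
    rcases Nat.lt_or_ge v.toNat cols with h2 | h2
    · rw [List.getD_eq_getElem (List.replicate cols false) false (by simpa using h2),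
        List.getElem_replicate]
    · rw [List.getD_eq_getElem?_getD, List.getElem?_eq_none (by simpa using h2)]
      rfl
  · have h0 : (List.replicate rows (List.replicate cols false)).getD u.toNat [] = [] := by
      rw [List.getD_eq_getElem?_getD, List.getElem?_eq_none (by simpa using h)]
      rfl
    rw [h0]
    rfl

-- the final to_remove grid marks exactly the cells whose character is in requests
theorem pvFinal (board2 : List (List Char)) (requests : List String) (rows cols : Nat)
    (r c : Nat) (hr : r < rows) (hc : c < cols) :
    pvBget (pvLoopR board2 requests rows cols (List.range rows)
        ⟨List.replicate rows (List.replicate cols false), pvShape_replicate rows cols⟩).1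
        (r : Int) (c : Int) =
      requests.contains (String.singleton (pvCget board2 (r : Int) (c : Int))) := by
  have hR := pvLoopR_inv board2 requests rows cols (List.range rows)
    ⟨List.replicate rows (List.replicate cols false), pvShape_replicate rows cols⟩
  cases hreq : requests.contains (String.singleton (pvCget board2 (r : Int) (c : Int))) with
  | true => exact hR.2.2 r (List.mem_range.2 hr) hr c hc hreq
  | false =>
    by_contra hne
    have hT : pvBget (pvLoopR board2 requests rows cols (List.range rows)
        ⟨List.replicate rows (List.replicate cols false), pvShape_replicate rows cols⟩).1
        (r : Int) (c : Int) = true := by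
      cases hv : pvBget (pvLoopR board2 requests rows cols (List.range rows)
          ⟨List.replicate rows (List.replicate cols false), pvShape_replicate rows cols⟩).1
          (r : Int) (c : Int) with
      | true => rfl
      | false => exact absurd hv hne
    rcases hR.2.1 _ _ hT with h' | h'
    · rw [pvBget_replicate] at h'
      exact Bool.false_ne_true h'
    · rw [hreq] at h'
      exact Bool.false_ne_true h'

-- counting helpers
theorem pvSetContains_ofList (xs : List String) (s : String) :
    PySem.Set.contains (PySem.Set.ofList xs) s = xs.contains s := by
  simp [pysem]

theorem pvTake_eq_map_range (l : List Char) (n : Nat) (h : n ≤ l.length) :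
    l.take n = (List.range n).map (fun c => l.getD c ' ') := by
  apply List.ext_getElem
  · simp; omega
  · intro i h1 h2
    have hi : i < n := by simp at h1; omega
    have hil : i < l.length := by omega
    simp [List.getElem?_eq_getElem hil]

-- ===== VERDICT (by name: the statement is the Claim_ definition above) =====
theorem solution_spec : Claim_equal_solution := by
  intro board requests hdom hpre
  unfold Spec_solution
  obtain ⟨hne, hall⟩ := hpre
  unfold solution solution_alt
  dsimp only
  set rows := board.length with hrows
  set cols := (board.headD "").toList.length with hcols
  set board2 := board.map String.toList with hboard2
  set gF := (pvLoopR board2 requests rows cols (List.range rows)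
    ⟨List.replicate rows (List.replicate cols false), pvShape_replicate rows cols⟩).1 with hgF
  -- characterize phase 2 of A as a sum of per-row counts
  have hA : (List.range rows).foldl (fun acc (r : Nat) =>
      (List.range cols).foldl (fun acc (c : Nat) =>
        if pvBget gF (r : Int) (c : Int) = false then acc + 1 else acc) acc) (0 : Int) =
      0 + ((List.range rows).map (fun (r : Nat) =>
        ((List.range cols).countP
          (fun (c : Nat) => !requests.contains (String.singleton (pvCget board2 (r : Int) (c : Int)))) : Int))).sum := by
    rw [PySem.List.foldl_congr_mem (g := fun acc (r : Nat) =>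
      acc + ((List.range cols).countP
        (fun (c : Nat) => !requests.contains (String.singleton (pvCget board2 (r : Int) (c : Int)))) : Int))]
    · exact PySem.List.foldl_add _ _ _
    · intro acc r hr
      rw [PySem.List.foldl_ite_add_one (fun (c : Nat) => pvBget gF (r : Int) (c : Int) = false)]
      congr 2
      apply List.countP_congr
      intro c hc
      rw [hgF, pvFinal board2 requests rows cols r c (List.mem_range.1 hr) (List.mem_range.1 hc)]
      cases requests.contains (String.singleton (pvCget board2 (r : Int) (c : Int))) <;> simp
  -- characterize B as a sum of per-row counts
  have hB : board.foldl (fun total row =>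
      (row.toList.take cols).foldl (fun t ch =>
        if !PySem.Set.contains (PySem.Set.ofList requests) (String.singleton ch) then t + 1
        else t) total) (0 : Int) =
      0 + (board.map (fun row =>
        ((row.toList.take cols).countP
          (fun ch => !requests.contains (String.singleton ch)) : Int))).sum := by
    rw [PySem.List.foldl_congr_mem (g := fun total row =>
      total + ((row.toList.take cols).countP
        (fun ch => !requests.contains (String.singleton ch)) : Int))]
    · exact PySem.List.foldl_add _ _ _
    · intro total row _
      rw [PySem.List.foldl_if_add_one
        (fun ch => !PySem.Set.contains (PySem.Set.ofList requests) (String.singleton ch))]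
      congr 2
      apply List.countP_congr
      intro ch _
      rw [pvSetContains_ofList]
  rw [hA, hB]
  congr 1
  apply congrArg
  apply List.ext_getElem
  · simp [hrows]
  · intro i h1 h2
    have hi : i < rows := by simpa using h1
    have hib : i < board.length := hi
    simp only [List.getElem_map, List.getElem_range]
    have hmem : board[i] ∈ board := List.getElem_mem hib
    have hlen : cols ≤ board[i].toList.length := hall _ hmem
    rw [pvTake_eq_map_range board[i].toList cols hlen, List.countP_map]
    congr 1
    apply List.countP_congr
    intro c hc
    simp only [Function.comp_apply]
    have hcg : pvCget board2 (i : Int) (c : Int) = board[i].toList.getD c ' ' := by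
      unfold pvCget
      have h2b : i < board2.length := by simpa [hboard2] using hib
      rw [Int.toNat_natCast, Int.toNat_natCast,
        List.getD_eq_getElem board2 [] h2b]
      simp [hboard2]
    rw [hcg]
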